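-- pv_equiv track=rewrite | github.com/nyucel/blm2010 | final/180401057.py | toplam_xy
-- ===== SOURCE A (Python) =====
-- def toplam_xy(veriler, elemanSayisi):
--     degerler = []
--     for i in range(7):
--         xiyi = 0
--         for k in range(elemanSayisi):
--             xiyi += ((k + 1) ** i)*(veriler[k])
--         degerler.append(xiyi)
--     return degerler
-- ===== SOURCE B (Python) =====
-- def toplam_xy(veriler, elemanSayisi):
--     degerler = [0] * 7
--     for k in range(elemanSayisi):
--         v = veriler[k]
--         pw = 1
--         yeni = []
--         for d in degerler:
--             yeni.append(d + pw * v)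
--             pw *= (k + 1)
--         degerler = yeni
--     return degerler
-- ===== Notes on version B (the rewrite author's own statement) =====
-- stated objective: alternative
-- what changed: Single pass over the data maintaining all seven weighted sums simultaneously with a running power pw *= (k+1), instead of seven separate scans each recomputing (k+1)**i; trades repeated pow calls for one list rebuild per element, measured at about the same speed.
import Mathlib
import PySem

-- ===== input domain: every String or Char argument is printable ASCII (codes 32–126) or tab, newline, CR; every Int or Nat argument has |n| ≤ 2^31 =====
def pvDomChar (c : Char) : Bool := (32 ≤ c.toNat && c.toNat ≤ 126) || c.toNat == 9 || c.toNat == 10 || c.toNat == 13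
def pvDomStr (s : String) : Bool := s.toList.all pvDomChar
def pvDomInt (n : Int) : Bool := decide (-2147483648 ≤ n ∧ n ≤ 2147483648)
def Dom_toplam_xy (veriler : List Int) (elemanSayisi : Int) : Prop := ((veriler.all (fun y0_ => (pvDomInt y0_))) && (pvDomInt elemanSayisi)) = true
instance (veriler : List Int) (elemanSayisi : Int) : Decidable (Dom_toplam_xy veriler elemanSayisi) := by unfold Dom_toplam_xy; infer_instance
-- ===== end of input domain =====

-- B computes all seven weighted sums in one pass with a running power pw *= (k+1)
-- instead of A's seven separate scans each recomputing (k+1)**i; same return value on Pre_.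

-- ===== PORT A =====
-- veriler[k] is ported as pyGetD veriler k 0; Pre_ restricts to inputs where k is always in
-- range (otherwise Python raises IndexError), so the default is never the value used.
def toplam_xy (veriler : List Int) (elemanSayisi : Int) : List Int :=
  (PySem.List.pyRange 0 7 1).foldl (fun degerler i =>
    degerler ++ [(PySem.List.pyRange 0 elemanSayisi 1).foldl
      (fun xiyi k => xiyi + (k + 1) ^ i.toNat * PySem.List.pyGetD veriler k 0) 0]) []

-- ===== PORT B =====
def toplam_xy_alt (veriler : List Int) (elemanSayisi : Int) : List Int :=
  (PySem.List.pyRange 0 elemanSayisi 1).foldl (fun degerler k =>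
    (degerler.foldl
      (fun (st : List Int × Int) d =>
        (st.1 ++ [d + st.2 * PySem.List.pyGetD veriler k 0], st.2 * (k + 1)))
      ([], 1)).1)
    [0, 0, 0, 0, 0, 0, 0]

-- ===== PRECONDITION & SPEC =====
-- Pre_ excludes elemanSayisi > len(veriler), where Python A raises IndexError.
def Pre_toplam_xy (veriler : List Int) (elemanSayisi : Int) : Prop :=
  elemanSayisi ≤ (veriler.length : Int)
instance (veriler : List Int) (elemanSayisi : Int) : Decidable (Pre_toplam_xy veriler elemanSayisi) := by unfold Pre_toplam_xy; infer_instance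

def pvWitness_toplam_xy : List Int × Int := ([3, -1, 4], 3)

def Spec_toplam_xy (veriler : List Int) (elemanSayisi : Int) (out : List Int) : Prop := out = toplam_xy_alt veriler elemanSayisi
instance (veriler : List Int) (elemanSayisi : Int) (out : List Int) : Decidable (Spec_toplam_xy veriler elemanSayisi out) := by unfold Spec_toplam_xy; infer_instance

-- ===== CLAIM (what is proved, stated in full; the proofs are below) =====
def Claim_equal_toplam_xy : Prop := ∀ (veriler : List Int) (elemanSayisi : Int), Dom_toplam_xy veriler elemanSayisi → Pre_toplam_xy veriler elemanSayisi → Spec_toplam_xy veriler elemanSayisi (toplam_xy veriler elemanSayisi)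

-- ===== LEMMAS AND PROOFS =====

-- A's inner scan for a fixed exponent i.
def pvInner (veriler : List Int) (i : Nat) (a k : Int) : Int :=
  a + (k + 1) ^ i * PySem.List.pyGetD veriler k 0

-- one step of B's outer loop, applied to a 7-element state, written out componentwise
theorem pvStep7 (veriler : List Int) (k a0 a1 a2 a3 a4 a5 a6 : Int) :
    (([a0, a1, a2, a3, a4, a5, a6].foldl
      (fun (st : List Int × Int) d =>
        (st.1 ++ [d + st.2 * PySem.List.pyGetD veriler k 0], st.2 * (k + 1)))
      ([], 1)).1 : List Int)
    = [pvInner veriler 0 a0 k, pvInner veriler 1 a1 k, pvInner veriler 2 a2 k,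
       pvInner veriler 3 a3 k, pvInner veriler 4 a4 k, pvInner veriler 5 a5 k,
       pvInner veriler 6 a6 k] := by
  simp only [List.foldl, List.nil_append, List.cons_append, List.cons.injEq, and_true]
  refine ⟨?_, ?_, ?_, ?_, ?_, ?_, ?_⟩ <;> (unfold pvInner; ring)

-- invariant of B's outer loop: folding any list of indices over the 7-component state
-- is the tuple of A's seven independent folds
theorem pvLoop (veriler : List Int) (ks : List Int) :
    ∀ a0 a1 a2 a3 a4 a5 a6 : Int,
    ks.foldl (fun degerler k =>
      (degerler.foldl
        (fun (st : List Int × Int) d =>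
          (st.1 ++ [d + st.2 * PySem.List.pyGetD veriler k 0], st.2 * (k + 1)))
        ([], 1)).1)
      [a0, a1, a2, a3, a4, a5, a6]
    = [ks.foldl (pvInner veriler 0) a0, ks.foldl (pvInner veriler 1) a1,
       ks.foldl (pvInner veriler 2) a2, ks.foldl (pvInner veriler 3) a3,
       ks.foldl (pvInner veriler 4) a4, ks.foldl (pvInner veriler 5) a5,
       ks.foldl (pvInner veriler 6) a6] := by
  induction ks with
  | nil => intro a0 a1 a2 a3 a4 a5 a6; rfl
  | cons k ks ih =>
      intro a0 a1 a2 a3 a4 a5 a6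
      rw [List.foldl_cons]
      rw [pvStep7]
      exact ih _ _ _ _ _ _ _

theorem pvInner_eq (veriler : List Int) (i : Nat) :
    pvInner veriler i = fun a k => a + (k + 1) ^ i * PySem.List.pyGetD veriler k 0 := rfl

theorem pvRange7 : PySem.List.pyRange 0 7 1 = [0, 1, 2, 3, 4, 5, 6] := by decide

-- ===== VERDICT (by name: the statement is the Claim_ definition above) =====
theorem toplam_xy_spec : Claim_equal_toplam_xy := by
  intro veriler elemanSayisi _ _
  unfold Spec_toplam_xy toplam_xy toplam_xy_alt
  rw [pvRange7, pvLoop]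
  simp [List.foldl, pvInner_eq]
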